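-- pv_equiv track=rewrite | github.com/dhakal07/ai-health-agent | backend/app/main.py | _triage
-- ===== SOURCE A (Python) =====
-- DISCLAIMER = (
--     "I'm an educational demo avatar, not a medical professional. "
--     "I don't diagnose or provide personalized medical advice. "
--     "If this is urgent or you have severe symptoms, seek local emergency care."
-- )
--
-- EMERGENCY_SIGNS = [
--     "severe chest pain", "crushing chest pain", "trouble breathing", "shortness of breath",
--     "blue lips", "confusion", "cannot wake", "unconscious", "stroke", "numb on one side",
--     "worst headache of my life", "suicidal", "suicide", "bleeding won't stop", "cant breathe",
-- ]
--
-- def _contains_any(text: str, bag) -> bool: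
--     t = text.lower()
--     return any(k in t for k in bag)
--
-- def _triage(text: str) -> str:
--     t = text.lower().strip()
--
--     if _contains_any(t, EMERGENCY_SIGNS):
--         return (
--             f"{DISCLAIMER} Your message mentions potentially urgent warning signs. "
--             "Please call your local emergency number or go to the nearest emergency department now."
--         )
--
--     if any(k in t for k in ["fever", "cold", "cough", "sore throat", "flu", "runny nose", "congestion"]):
--         return (
--             f"{DISCLAIMER} For typical cold/flu: rest, fluids, and over-the-counter symptom relief can help. "
--             "Red flags: breathing trouble, chest pain, confusion, dehydration, fever >3–4 days, or rapid worsening."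
--         )
--
--     if any(k in t for k in ["allergy", "allergies", "hay fever", "pollen"]):
--         return (
--             f"{DISCLAIMER} Allergy tips: avoid triggers, consider saline rinses and common antihistamines. "
--             "If wheezing or breathing problems develop, seek care promptly."
--         )
--
--     if any(k in t for k in ["stomach", "nausea", "vomit", "diarrhea", "gastro"]):
--         return (
--             f"{DISCLAIMER} For mild stomach upset: hydrate with small frequent sips; oral rehydration can help. "
--             "Seek care if there is blood, high fever, severe pain, dehydration, or symptoms >2–3 days."
--         )
--
--     if any(k in t for k in ["headache", "migraine"]):
--         return (
--             f"{DISCLAIMER} Headache tips: rest, hydrate, and consider simple pain relief if appropriate. "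
--             "Red flags: sudden worst headache, head injury, fever with stiff neck, vision/speech changes, weakness."
--         )
--
--     if any(k in t for k in ["anxiety", "panic", "worry", "stress"]):
--         return (
--             f"{DISCLAIMER} Try slow breathing (in 4s, hold 4s, out 6–8s), brief movement, and limiting caffeine. "
--             "If anxiety interferes with life, a licensed therapist can help."
--         )
--
--     if any(k in t for k in ["depress", "low mood", "hopeless"]):
--         return (
--             f"{DISCLAIMER} Routines, sunlight, movement, and social contact can help mood. "
--             "If thoughts of self-harm occur, contact local crisis services or a clinician immediately."
--         )
--
--     if any(k in t for k in ["sleep", "insomnia"]):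
--         return (
--             f"{DISCLAIMER} Sleep tips: consistent schedule, cool/dark/quiet room, screens off before bed, "
--             "keep caffeine earlier in the day. If snoring with pauses, discuss with a clinician."
--         )
--
--     if any(k in t for k in ["diet", "nutrition", "eat healthy", "weight", "obesity"]):
--         return (
--             f"{DISCLAIMER} Balanced plate: vegetables, lean protein, whole grains, healthy fats; fewer ultra-processed foods. "
--             "Small steady changes beat extreme diets. A registered dietitian can tailor a plan."
--         )
--
--     if any(k in t for k in ["exercise", "workout", "physical activity"]):
--         return (
--             f"{DISCLAIMER} Aim for ~150 min/week of moderate activity plus two days of strength training if you can. "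
--             "Start gently and increase gradually; any movement helps."
--         )
--
--     if any(k in t for k in ["vaccine", "vaccination", "immunization"]):
--         return (
--             f"{DISCLAIMER} Vaccines reduce risk of severe illness. Recommendations depend on age, health, and local guidance. "
--             "Your clinician or public health site can provide the latest advice."
--         )
--
--     if any(k in t for k in ["autism", "asd", "spectrum"]):
--         return (
--             f"{DISCLAIMER} Autism involves differences in communication, social interaction, and sensory processing. "
--             "Only trained professionals can diagnose it. I can share general information and resources."
--         )
--
--     if t in {"hi", "hello", "hey"} or "hello" in t or "hi " in t:
--         return f"{DISCLAIMER} Hello! How are you feeling today? I can share general wellness information."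
--
--     return (
--         f"{DISCLAIMER} Tell me what general topic you want to know about (sleep, headaches, anxiety, "
--         "cold/flu, vaccines, nutrition, exercise, etc.)."
--     )
-- ===== SOURCE B (Python) =====
-- DISCLAIMER = (
--     "I'm an educational demo avatar, not a medical professional. "
--     "I don't diagnose or provide personalized medical advice. "
--     "If this is urgent or you have severe symptoms, seek local emergency care."
-- )
--
-- # priority-ordered topic groups; group 0 is the emergency group
-- GROUPS = [
--     ["severe chest pain", "crushing chest pain", "trouble breathing", "shortness of breath",
--      "blue lips", "confusion", "cannot wake", "unconscious", "stroke", "numb on one side",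
--      "worst headache of my life", "suicidal", "suicide", "bleeding won't stop", "cant breathe"],
--     ["fever", "cold", "cough", "sore throat", "flu", "runny nose", "congestion"],
--     ["allergy", "allergies", "hay fever", "pollen"],
--     ["stomach", "nausea", "vomit", "diarrhea", "gastro"],
--     ["headache", "migraine"],
--     ["anxiety", "panic", "worry", "stress"],
--     ["depress", "low mood", "hopeless"],
--     ["sleep", "insomnia"],
--     ["diet", "nutrition", "eat healthy", "weight", "obesity"],
--     ["exercise", "workout", "physical activity"],
--     ["vaccine", "vaccination", "immunization"],
--     ["autism", "asd", "spectrum"],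
-- ]
--
-- RESPONSES = [
--     f"{DISCLAIMER} Your message mentions potentially urgent warning signs. "
--     "Please call your local emergency number or go to the nearest emergency department now.",
--     f"{DISCLAIMER} For typical cold/flu: rest, fluids, and over-the-counter symptom relief can help. "
--     "Red flags: breathing trouble, chest pain, confusion, dehydration, fever >3–4 days, or rapid worsening.",
--     f"{DISCLAIMER} Allergy tips: avoid triggers, consider saline rinses and common antihistamines. "
--     "If wheezing or breathing problems develop, seek care promptly.",
--     f"{DISCLAIMER} For mild stomach upset: hydrate with small frequent sips; oral rehydration can help. "
--     "Seek care if there is blood, high fever, severe pain, dehydration, or symptoms >2–3 days.",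
--     f"{DISCLAIMER} Headache tips: rest, hydrate, and consider simple pain relief if appropriate. "
--     "Red flags: sudden worst headache, head injury, fever with stiff neck, vision/speech changes, weakness.",
--     f"{DISCLAIMER} Try slow breathing (in 4s, hold 4s, out 6–8s), brief movement, and limiting caffeine. "
--     "If anxiety interferes with life, a licensed therapist can help.",
--     f"{DISCLAIMER} Routines, sunlight, movement, and social contact can help mood. "
--     "If thoughts of self-harm occur, contact local crisis services or a clinician immediately.",
--     f"{DISCLAIMER} Sleep tips: consistent schedule, cool/dark/quiet room, screens off before bed, "
--     "keep caffeine earlier in the day. If snoring with pauses, discuss with a clinician.",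
--     f"{DISCLAIMER} Balanced plate: vegetables, lean protein, whole grains, healthy fats; fewer ultra-processed foods. "
--     "Small steady changes beat extreme diets. A registered dietitian can tailor a plan.",
--     f"{DISCLAIMER} Aim for ~150 min/week of moderate activity plus two days of strength training if you can. "
--     "Start gently and increase gradually; any movement helps.",
--     f"{DISCLAIMER} Vaccines reduce risk of severe illness. Recommendations depend on age, health, and local guidance. "
--     "Your clinician or public health site can provide the latest advice.",
--     f"{DISCLAIMER} Autism involves differences in communication, social interaction, and sensory processing. "
--     "Only trained professionals can diagnose it. I can share general information and resources.",
-- ]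
--
-- # one flat keyword -> priority-index table; the answer is the minimum index among matches
-- PATTERNS = [(kw, i) for i, kws in enumerate(GROUPS) for kw in kws]
--
-- def _triage(text: str) -> str:
--     t = text.lower().strip()
--
--     best = None
--     for kw, i in PATTERNS:
--         if kw in t and (best is None or i < best):
--             best = i
--     if best is not None:
--         return RESPONSES[best]
--
--     if t in {"hi", "hello", "hey"} or "hello" in t or "hi " in t:
--         return f"{DISCLAIMER} Hello! How are you feeling today? I can share general wellness information."
--
--     return (
--         f"{DISCLAIMER} Tell me what general topic you want to know about (sleep, headaches, anxiety, "
--         "cold/flu, vaccines, nutrition, exercise, etc.)."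
--     )
-- ===== Notes on version B (the rewrite author's own statement) =====
-- stated objective: alternative
-- what changed: A's cascade of per-topic any(keyword in t) if-branches is replaced by a single flat pass over one keyword->priority-index table that keeps the minimum matching index and then looks the response up by that index; greeting/default fallback kept after the scan.
import Mathlib
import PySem

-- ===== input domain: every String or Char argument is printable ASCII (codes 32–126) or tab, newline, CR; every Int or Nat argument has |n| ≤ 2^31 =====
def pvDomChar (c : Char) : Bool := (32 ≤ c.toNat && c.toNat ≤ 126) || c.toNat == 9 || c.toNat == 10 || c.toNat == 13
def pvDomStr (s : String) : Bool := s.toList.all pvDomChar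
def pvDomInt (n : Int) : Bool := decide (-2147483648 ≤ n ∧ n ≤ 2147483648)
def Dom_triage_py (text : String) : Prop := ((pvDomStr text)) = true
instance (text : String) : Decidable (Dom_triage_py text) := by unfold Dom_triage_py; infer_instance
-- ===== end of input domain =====

-- B replaces A's cascade of per-topic if-branches by one flat pass over a keyword->priority table that keeps the minimum matching priority index; objective: alternative (same cost, different algorithm).

-- ===== PORT A =====
-- helper _contains_any(text, bag): lowercases its argument and tests each keyword for substring
def pvContainsAny (text : String) (bag : List String) : Bool :=
  let t := PySem.Str.lower text
  bag.any (fun k => PySem.Str.isIn k t)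

def pvEmergencySigns : List String :=
  ["severe chest pain", "crushing chest pain", "trouble breathing", "shortness of breath", "blue lips", "confusion", "cannot wake", "unconscious", "stroke", "numb on one side", "worst headache of my life", "suicidal", "suicide", "bleeding won't stop", "cant breathe"]

def triage_py (text : String) : String :=
  let t := PySem.Str.strip (PySem.Str.lower text)
  if pvContainsAny t pvEmergencySigns then
    "I'm an educational demo avatar, not a medical professional. I don't diagnose or provide personalized medical advice. If this is urgent or you have severe symptoms, seek local emergency care. Your message mentions potentially urgent warning signs. Please call your local emergency number or go to the nearest emergency department now."
  else
  if (["fever", "cold", "cough", "sore throat", "flu", "runny nose", "congestion"] : List String).any (fun k => PySem.Str.isIn k t) then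
    "I'm an educational demo avatar, not a medical professional. I don't diagnose or provide personalized medical advice. If this is urgent or you have severe symptoms, seek local emergency care. For typical cold/flu: rest, fluids, and over-the-counter symptom relief can help. Red flags: breathing trouble, chest pain, confusion, dehydration, fever >3–4 days, or rapid worsening."
  else
  if (["allergy", "allergies", "hay fever", "pollen"] : List String).any (fun k => PySem.Str.isIn k t) then
    "I'm an educational demo avatar, not a medical professional. I don't diagnose or provide personalized medical advice. If this is urgent or you have severe symptoms, seek local emergency care. Allergy tips: avoid triggers, consider saline rinses and common antihistamines. If wheezing or breathing problems develop, seek care promptly."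
  else
  if (["stomach", "nausea", "vomit", "diarrhea", "gastro"] : List String).any (fun k => PySem.Str.isIn k t) then
    "I'm an educational demo avatar, not a medical professional. I don't diagnose or provide personalized medical advice. If this is urgent or you have severe symptoms, seek local emergency care. For mild stomach upset: hydrate with small frequent sips; oral rehydration can help. Seek care if there is blood, high fever, severe pain, dehydration, or symptoms >2–3 days."
  else
  if (["headache", "migraine"] : List String).any (fun k => PySem.Str.isIn k t) then
    "I'm an educational demo avatar, not a medical professional. I don't diagnose or provide personalized medical advice. If this is urgent or you have severe symptoms, seek local emergency care. Headache tips: rest, hydrate, and consider simple pain relief if appropriate. Red flags: sudden worst headache, head injury, fever with stiff neck, vision/speech changes, weakness."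
  else
  if (["anxiety", "panic", "worry", "stress"] : List String).any (fun k => PySem.Str.isIn k t) then
    "I'm an educational demo avatar, not a medical professional. I don't diagnose or provide personalized medical advice. If this is urgent or you have severe symptoms, seek local emergency care. Try slow breathing (in 4s, hold 4s, out 6–8s), brief movement, and limiting caffeine. If anxiety interferes with life, a licensed therapist can help."
  else
  if (["depress", "low mood", "hopeless"] : List String).any (fun k => PySem.Str.isIn k t) then
    "I'm an educational demo avatar, not a medical professional. I don't diagnose or provide personalized medical advice. If this is urgent or you have severe symptoms, seek local emergency care. Routines, sunlight, movement, and social contact can help mood. If thoughts of self-harm occur, contact local crisis services or a clinician immediately."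
  else
  if (["sleep", "insomnia"] : List String).any (fun k => PySem.Str.isIn k t) then
    "I'm an educational demo avatar, not a medical professional. I don't diagnose or provide personalized medical advice. If this is urgent or you have severe symptoms, seek local emergency care. Sleep tips: consistent schedule, cool/dark/quiet room, screens off before bed, keep caffeine earlier in the day. If snoring with pauses, discuss with a clinician."
  else
  if (["diet", "nutrition", "eat healthy", "weight", "obesity"] : List String).any (fun k => PySem.Str.isIn k t) then
    "I'm an educational demo avatar, not a medical professional. I don't diagnose or provide personalized medical advice. If this is urgent or you have severe symptoms, seek local emergency care. Balanced plate: vegetables, lean protein, whole grains, healthy fats; fewer ultra-processed foods. Small steady changes beat extreme diets. A registered dietitian can tailor a plan."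
  else
  if (["exercise", "workout", "physical activity"] : List String).any (fun k => PySem.Str.isIn k t) then
    "I'm an educational demo avatar, not a medical professional. I don't diagnose or provide personalized medical advice. If this is urgent or you have severe symptoms, seek local emergency care. Aim for ~150 min/week of moderate activity plus two days of strength training if you can. Start gently and increase gradually; any movement helps."
  else
  if (["vaccine", "vaccination", "immunization"] : List String).any (fun k => PySem.Str.isIn k t) then
    "I'm an educational demo avatar, not a medical professional. I don't diagnose or provide personalized medical advice. If this is urgent or you have severe symptoms, seek local emergency care. Vaccines reduce risk of severe illness. Recommendations depend on age, health, and local guidance. Your clinician or public health site can provide the latest advice."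
  else
  if (["autism", "asd", "spectrum"] : List String).any (fun k => PySem.Str.isIn k t) then
    "I'm an educational demo avatar, not a medical professional. I don't diagnose or provide personalized medical advice. If this is urgent or you have severe symptoms, seek local emergency care. Autism involves differences in communication, social interaction, and sensory processing. Only trained professionals can diagnose it. I can share general information and resources."
  else
  if (t == "hi" || t == "hello" || t == "hey") || PySem.Str.isIn "hello" t || PySem.Str.isIn "hi " t then
    "I'm an educational demo avatar, not a medical professional. I don't diagnose or provide personalized medical advice. If this is urgent or you have severe symptoms, seek local emergency care. Hello! How are you feeling today? I can share general wellness information."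
  else
    "I'm an educational demo avatar, not a medical professional. I don't diagnose or provide personalized medical advice. If this is urgent or you have severe symptoms, seek local emergency care. Tell me what general topic you want to know about (sleep, headaches, anxiety, cold/flu, vaccines, nutrition, exercise, etc.)."

-- ===== PORT B =====
-- priority-ordered topic groups; group 0 is the emergency group
def pvGroups : List (List String) :=
  [["severe chest pain", "crushing chest pain", "trouble breathing", "shortness of breath", "blue lips", "confusion", "cannot wake", "unconscious", "stroke", "numb on one side", "worst headache of my life", "suicidal", "suicide", "bleeding won't stop", "cant breathe"],
   ["fever", "cold", "cough", "sore throat", "flu", "runny nose", "congestion"],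
   ["allergy", "allergies", "hay fever", "pollen"],
   ["stomach", "nausea", "vomit", "diarrhea", "gastro"],
   ["headache", "migraine"],
   ["anxiety", "panic", "worry", "stress"],
   ["depress", "low mood", "hopeless"],
   ["sleep", "insomnia"],
   ["diet", "nutrition", "eat healthy", "weight", "obesity"],
   ["exercise", "workout", "physical activity"],
   ["vaccine", "vaccination", "immunization"],
   ["autism", "asd", "spectrum"]]

def pvResponses : List String :=
  ["I'm an educational demo avatar, not a medical professional. I don't diagnose or provide personalized medical advice. If this is urgent or you have severe symptoms, seek local emergency care. Your message mentions potentially urgent warning signs. Please call your local emergency number or go to the nearest emergency department now.",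
   "I'm an educational demo avatar, not a medical professional. I don't diagnose or provide personalized medical advice. If this is urgent or you have severe symptoms, seek local emergency care. For typical cold/flu: rest, fluids, and over-the-counter symptom relief can help. Red flags: breathing trouble, chest pain, confusion, dehydration, fever >3–4 days, or rapid worsening.",
   "I'm an educational demo avatar, not a medical professional. I don't diagnose or provide personalized medical advice. If this is urgent or you have severe symptoms, seek local emergency care. Allergy tips: avoid triggers, consider saline rinses and common antihistamines. If wheezing or breathing problems develop, seek care promptly.",
   "I'm an educational demo avatar, not a medical professional. I don't diagnose or provide personalized medical advice. If this is urgent or you have severe symptoms, seek local emergency care. For mild stomach upset: hydrate with small frequent sips; oral rehydration can help. Seek care if there is blood, high fever, severe pain, dehydration, or symptoms >2–3 days.",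
   "I'm an educational demo avatar, not a medical professional. I don't diagnose or provide personalized medical advice. If this is urgent or you have severe symptoms, seek local emergency care. Headache tips: rest, hydrate, and consider simple pain relief if appropriate. Red flags: sudden worst headache, head injury, fever with stiff neck, vision/speech changes, weakness.",
   "I'm an educational demo avatar, not a medical professional. I don't diagnose or provide personalized medical advice. If this is urgent or you have severe symptoms, seek local emergency care. Try slow breathing (in 4s, hold 4s, out 6–8s), brief movement, and limiting caffeine. If anxiety interferes with life, a licensed therapist can help.",
   "I'm an educational demo avatar, not a medical professional. I don't diagnose or provide personalized medical advice. If this is urgent or you have severe symptoms, seek local emergency care. Routines, sunlight, movement, and social contact can help mood. If thoughts of self-harm occur, contact local crisis services or a clinician immediately.",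
   "I'm an educational demo avatar, not a medical professional. I don't diagnose or provide personalized medical advice. If this is urgent or you have severe symptoms, seek local emergency care. Sleep tips: consistent schedule, cool/dark/quiet room, screens off before bed, keep caffeine earlier in the day. If snoring with pauses, discuss with a clinician.",
   "I'm an educational demo avatar, not a medical professional. I don't diagnose or provide personalized medical advice. If this is urgent or you have severe symptoms, seek local emergency care. Balanced plate: vegetables, lean protein, whole grains, healthy fats; fewer ultra-processed foods. Small steady changes beat extreme diets. A registered dietitian can tailor a plan.",
   "I'm an educational demo avatar, not a medical professional. I don't diagnose or provide personalized medical advice. If this is urgent or you have severe symptoms, seek local emergency care. Aim for ~150 min/week of moderate activity plus two days of strength training if you can. Start gently and increase gradually; any movement helps.",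
   "I'm an educational demo avatar, not a medical professional. I don't diagnose or provide personalized medical advice. If this is urgent or you have severe symptoms, seek local emergency care. Vaccines reduce risk of severe illness. Recommendations depend on age, health, and local guidance. Your clinician or public health site can provide the latest advice.",
   "I'm an educational demo avatar, not a medical professional. I don't diagnose or provide personalized medical advice. If this is urgent or you have severe symptoms, seek local emergency care. Autism involves differences in communication, social interaction, and sensory processing. Only trained professionals can diagnose it. I can share general information and resources."]

-- PATTERNS = [(kw, i) for i, kws in enumerate(GROUPS) for kw in kws]
def pvPatterns : List (String × Int) :=
  (PySem.List.enumerate pvGroups 0).flatMap (fun p => p.2.map (fun k => (k, p.1)))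

-- the loop body: keep the smallest matching priority index seen so far
def pvStep (t : String) (best : Option Int) (p : String × Int) : Option Int :=
  if PySem.Str.isIn p.1 t && (match best with | none => true | some b => decide (p.2 < b)) then some p.2 else best

def triage_py_alt (text : String) : String :=
  let t := PySem.Str.strip (PySem.Str.lower text)
  match pvPatterns.foldl (pvStep t) none with
  | some i => PySem.List.pyGetD pvResponses i ""
  | none =>
    if (t == "hi" || t == "hello" || t == "hey") || PySem.Str.isIn "hello" t || PySem.Str.isIn "hi " t then
      "I'm an educational demo avatar, not a medical professional. I don't diagnose or provide personalized medical advice. If this is urgent or you have severe symptoms, seek local emergency care. Hello! How are you feeling today? I can share general wellness information."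
    else
      "I'm an educational demo avatar, not a medical professional. I don't diagnose or provide personalized medical advice. If this is urgent or you have severe symptoms, seek local emergency care. Tell me what general topic you want to know about (sleep, headaches, anxiety, cold/flu, vaccines, nutrition, exercise, etc.)."

-- ===== PRECONDITION & SPEC =====
def Spec_triage_py (text : String) (out : String) : Prop := out = triage_py_alt text
instance (text : String) (out : String) : Decidable (Spec_triage_py text out) := by unfold Spec_triage_py; infer_instance

-- ===== CLAIM (what is proved, stated in full; the proofs are below) =====
def Claim_equal_triage_py : Prop := ∀ (text : String), Dom_triage_py text → Spec_triage_py text (triage_py text)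

-- ===== LEMMAS AND PROOFS =====

-- spec of B's loop per group block, phrased as the first matching group from offset n
def pvFirstHit (t : String) (n : Int) : List (List String) → Option Int
  | [] => none
  | g :: rest => if g.any (fun k => PySem.Str.isIn k t) then some n else pvFirstHit t (n + 1) rest

theorem pv_lowerChar_not_upper (c : Char) :
    PySem.Chars.isupper (PySem.Chars.lowerChar c) = false := by
  have key : ∀ a b : Char, a ≤ b ↔ a.toNat ≤ b.toNat := by
    intro a b; rw [Char.le_def, UInt32.le_iff_toNat_le]; rfl
  unfold PySem.Chars.lowerChar
  by_cases h : PySem.Chars.isupper c = true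
  · rw [if_pos h]
    unfold PySem.Chars.isupper at *
    simp only [Bool.and_eq_true, decide_eq_true_eq, key] at h
    obtain ⟨ha, hb⟩ := h
    have ha' : (65 : Nat) ≤ c.toNat := ha
    have hb' : c.toNat ≤ 90 := hb
    clear ha hb
    generalize c.toNat = n at ha' hb' ⊢
    interval_cases n <;> decide
  · rw [if_neg h]
    exact Bool.eq_false_iff.mpr h

theorem pv_lowerChar_idem (c : Char) :
    PySem.Chars.lowerChar (PySem.Chars.lowerChar c) = PySem.Chars.lowerChar c := by
  have h := pv_lowerChar_not_upper c
  generalize PySem.Chars.lowerChar c = d at h ⊢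
  unfold PySem.Chars.lowerChar
  rw [h]
  simp

-- t = text.lower().strip() is already lowercase, so _contains_any's re-lowering is a no-op
theorem pv_lower_strip_lower (s : String) :
    PySem.Str.lower (PySem.Str.strip (PySem.Str.lower s)) = PySem.Str.strip (PySem.Str.lower s) := by
  apply String.toList_inj.mp
  rw [PySem.Str.toList_lower, PySem.Str.toList_strip, PySem.Str.toList_lower]
  generalize s.toList = u
  have hsub : ∀ (l : List Char), PySem.Chars.strip l ⊆ l := by
    intro l c hc
    unfold PySem.Chars.strip PySem.Chars.rstrip PySem.Chars.lstrip at hc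
    rw [List.mem_reverse] at hc
    have h1 := (List.dropWhile_sublist _).subset hc
    rw [List.mem_reverse] at h1
    exact (List.dropWhile_sublist _).subset h1
  have hmem : ∀ c ∈ PySem.Chars.strip (PySem.Chars.lower u), PySem.Chars.lowerChar c = c := by
    intro c hc
    have h2 : c ∈ PySem.Chars.lower u := hsub _ hc
    unfold PySem.Chars.lower at h2
    obtain ⟨d, _, rfl⟩ := List.mem_map.mp h2
    exact pv_lowerChar_idem d
  calc PySem.Chars.lower (PySem.Chars.strip (PySem.Chars.lower u))
      = List.map id (PySem.Chars.strip (PySem.Chars.lower u)) := List.map_congr_left hmem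
    _ = PySem.Chars.strip (PySem.Chars.lower u) := List.map_id _

theorem pv_stay (t : String) (l : List (String × Int)) (b : Int)
    (h : ∀ p ∈ l, ¬ p.2 < b) : l.foldl (pvStep t) (some b) = some b := by
  induction l with
  | nil => rfl
  | cons p l ih =>
      have hp := h p (List.mem_cons_self ..)
      have h1 : pvStep t (some b) p = some b := by
        unfold pvStep; simp [hp]
      rw [List.foldl_cons, h1]
      exact ih (fun q hq => h q (List.mem_cons_of_mem _ hq))

theorem pv_group_fold (t : String) (ks : List String) (i : Int) :
    (ks.map (fun k => (k, i))).foldl (pvStep t) none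
      = if ks.any (fun k => PySem.Str.isIn k t) then some i else none := by
  induction ks with
  | nil => rfl
  | cons k ks ih =>
      rw [List.map_cons, List.foldl_cons]
      by_cases hk : PySem.Str.isIn k t = true
      · have h1 : pvStep t none (k, i) = some i := by unfold pvStep; rw [hk]; rfl
        rw [h1]
        simp only [List.any_cons, hk, Bool.true_or, if_true]
        exact pv_stay t _ i (by
          intro p hp
          obtain ⟨k', _, rfl⟩ := List.mem_map.mp hp
          omega)
      · have hk' : PySem.Str.isIn k t = false := Bool.eq_false_iff.mpr hk
        have h1 : pvStep t none (k, i) = none := by unfold pvStep; rw [hk']; rfl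
        rw [h1]
        simp only [List.any_cons, hk', Bool.false_or]
        exact ih

theorem pv_indices_ge (gs : List (List String)) (n : Int) :
    ∀ p ∈ (PySem.List.enumerate gs n).flatMap (fun p => p.2.map (fun k => (k, p.1))), n ≤ p.2 := by
  induction gs generalizing n with
  | nil => intro p hp; simp [PySem.List.enumerate_nil] at hp
  | cons g gs ih =>
      intro p hp
      rw [PySem.List.enumerate_cons, List.flatMap_cons, List.mem_append] at hp
      rcases hp with hp | hp
      · obtain ⟨k, _, rfl⟩ := List.mem_map.mp hp
        exact le_refl n
      · have := ih (n + 1) p hp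
        omega

theorem pv_fold_eq_firstHit (t : String) (gs : List (List String)) (n : Int) :
    ((PySem.List.enumerate gs n).flatMap (fun p => p.2.map (fun k => (k, p.1)))).foldl (pvStep t) none
      = pvFirstHit t n gs := by
  induction gs generalizing n with
  | nil => rfl
  | cons g gs ih =>
      rw [PySem.List.enumerate_cons, List.flatMap_cons, List.foldl_append, pv_group_fold,
        pvFirstHit]
      by_cases hg : g.any (fun k => PySem.Str.isIn k t) = true
      · rw [if_pos hg, if_pos hg]
        exact pv_stay t _ n (by
          intro p hp
          have := pv_indices_ge gs (n + 1) p hp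
          omega)
      · rw [if_neg hg, if_neg hg]
        exact ih (n + 1)

set_option maxHeartbeats 4000000 in
theorem pv_triage_eq (text : String) : triage_py text = triage_py_alt text := by
  have hu := pv_lower_strip_lower text
  simp only [triage_py, triage_py_alt, pvPatterns, pvContainsAny]
  generalize PySem.Str.strip (PySem.Str.lower text) = u at hu ⊢
  simp only [hu]
  rw [pv_fold_eq_firstHit]
  simp only [pvGroups, pvEmergencySigns]
  simp only [pvFirstHit]
  by_cases h : (["severe chest pain", "crushing chest pain", "trouble breathing", "shortness of breath", "blue lips", "confusion", "cannot wake", "unconscious", "stroke", "numb on one side", "worst headache of my life", "suicidal", "suicide", "bleeding won't stop", "cant breathe"].any (fun k => PySem.Str.isIn k u)) = true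
  · rw [if_pos h, if_pos h]; rfl
  rw [if_neg h, if_neg h]; clear h
  by_cases h : (["fever", "cold", "cough", "sore throat", "flu", "runny nose", "congestion"].any (fun k => PySem.Str.isIn k u)) = true
  · rw [if_pos h, if_pos h]; rfl
  rw [if_neg h, if_neg h]; clear h
  by_cases h : (["allergy", "allergies", "hay fever", "pollen"].any (fun k => PySem.Str.isIn k u)) = true
  · rw [if_pos h, if_pos h]; rfl
  rw [if_neg h, if_neg h]; clear h
  by_cases h : (["stomach", "nausea", "vomit", "diarrhea", "gastro"].any (fun k => PySem.Str.isIn k u)) = true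
  · rw [if_pos h, if_pos h]; rfl
  rw [if_neg h, if_neg h]; clear h
  by_cases h : (["headache", "migraine"].any (fun k => PySem.Str.isIn k u)) = true
  · rw [if_pos h, if_pos h]; rfl
  rw [if_neg h, if_neg h]; clear h
  by_cases h : (["anxiety", "panic", "worry", "stress"].any (fun k => PySem.Str.isIn k u)) = true
  · rw [if_pos h, if_pos h]; rfl
  rw [if_neg h, if_neg h]; clear h
  by_cases h : (["depress", "low mood", "hopeless"].any (fun k => PySem.Str.isIn k u)) = true
  · rw [if_pos h, if_pos h]; rfl
  rw [if_neg h, if_neg h]; clear h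
  by_cases h : (["sleep", "insomnia"].any (fun k => PySem.Str.isIn k u)) = true
  · rw [if_pos h, if_pos h]; rfl
  rw [if_neg h, if_neg h]; clear h
  by_cases h : (["diet", "nutrition", "eat healthy", "weight", "obesity"].any (fun k => PySem.Str.isIn k u)) = true
  · rw [if_pos h, if_pos h]; rfl
  rw [if_neg h, if_neg h]; clear h
  by_cases h : (["exercise", "workout", "physical activity"].any (fun k => PySem.Str.isIn k u)) = true
  · rw [if_pos h, if_pos h]; rfl
  rw [if_neg h, if_neg h]; clear h
  by_cases h : (["vaccine", "vaccination", "immunization"].any (fun k => PySem.Str.isIn k u)) = true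
  · rw [if_pos h, if_pos h]; rfl
  rw [if_neg h, if_neg h]; clear h
  by_cases h : (["autism", "asd", "spectrum"].any (fun k => PySem.Str.isIn k u)) = true
  · rw [if_pos h, if_pos h]; rfl
  rw [if_neg h, if_neg h]

-- ===== VERDICT (by name: the statement is the Claim_ definition above) =====
theorem triage_py_spec : Claim_equal_triage_py := by
  intro text _
  unfold Spec_triage_py
  exact pv_triage_eq text
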